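-- pv_equiv track=rewrite | github.com/replacementorange/moj | osa11/osa11-15_sulut_tasapainossa/src/sulut_tasapainossa.py | sulut_tasapainossa
-- ===== SOURCE A (Python) =====
-- def sulut_tasapainossa(merkkijono: str):
--     # Maaritellaan sulkeet
--     sulkeet = "()[]{}"
--
--     # Otetaan kaikki muu paitsi sulkeet pois
--     for merkki in merkkijono:
--         if merkki not in sulkeet:
--             merkkijono = merkkijono.replace(merkki, "")
--
--     # Pohja
--     if len(merkkijono) == 0:
--         return True
--     # Lisattu tarkistus
--     if not (merkkijono[0] == '(' and merkkijono[-1] == ')') and not (merkkijono[0] == '[' and merkkijono[-1] == ']'):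
--         return False
--
--     # poistetaan ensimmäinen ja viimeinen merkki
--     return sulut_tasapainossa(merkkijono[1:-1])
-- ===== SOURCE B (Python) =====
-- def sulut_tasapainossa(merkkijono: str):
--     # One filtering pass, then two-pointer pairing from both ends: O(n) total.
--     b = [c for c in merkkijono if c in "()[]{}"]
--     i, j = 0, len(b) - 1
--     while i < j:
--         x, y = b[i], b[j]
--         if not ((x == '(' and y == ')') or (x == '[' and y == ']')):
--             return False
--         i += 1
--         j -= 1
--     return i > j
-- ===== Notes on version B (the rewrite author's own statement) =====
-- stated objective: faster
-- what changed: A repeatedly calls str.replace while scanning and then recurses with string slicing, copying the string at every level; B filters the brackets once into a list and checks the outer-to-inner pairing with two index pointers in a single loop.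
import Mathlib
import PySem

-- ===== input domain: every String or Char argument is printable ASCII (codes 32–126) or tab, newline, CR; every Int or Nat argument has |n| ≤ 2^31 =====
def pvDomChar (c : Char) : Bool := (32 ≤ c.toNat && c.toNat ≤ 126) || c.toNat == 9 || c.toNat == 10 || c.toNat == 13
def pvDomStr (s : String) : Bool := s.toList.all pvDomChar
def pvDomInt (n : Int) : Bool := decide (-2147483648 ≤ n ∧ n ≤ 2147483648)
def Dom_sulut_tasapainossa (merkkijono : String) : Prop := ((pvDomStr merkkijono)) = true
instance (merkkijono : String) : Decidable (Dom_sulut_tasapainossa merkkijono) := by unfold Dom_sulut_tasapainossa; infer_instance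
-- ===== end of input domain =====

-- B filters the brackets once and pairs them from both ends with two index pointers,
-- instead of A's repeated str.replace passes and recursion on string slices (objective: faster).

-- ===== PORT A =====
-- the filtering loop: for merkki in merkkijono: if merkki not in sulkeet: merkkijono = merkkijono.replace(merkki, "")
-- (the for-loop iterates over the ORIGINAL string object while `merkkijono` is reassigned)
def aStrip (s : String) : String :=
  s.toList.foldl (fun acc c =>
    if !(PySem.Str.isIn (String.ofList [c]) "()[]{}") then PySem.Str.replace acc (String.ofList [c]) ""
    else acc) s

-- the recursive part of A on the character list of the (already filtered) string;
-- string indexing/slicing is exact as the PySem.List operation on the code points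
def aRec (l : List Char) : Bool :=
  if l.length = 0 then true
  else if !(PySem.List.pyGet? l 0 == some '(' && PySem.List.pyGet? l (-1) == some ')')
       && !(PySem.List.pyGet? l 0 == some '[' && PySem.List.pyGet? l (-1) == some ']') then false
  else aRec (PySem.List.slice l (some 1) (some (-1)))
termination_by l.length
decreasing_by
  simp only [PySem.List.length_slice]
  have h1 : PySem.List.clampIdx l.length (-1) = l.length - 1 := PySem.List.clampIdx_neg_one _
  omega

def sulut_tasapainossa (merkkijono : String) : Bool :=
  aRec (aStrip merkkijono).toList

-- ===== PORT B =====
def pvGood (x y : Char) : Bool := (x == '(' && y == ')') || (x == '[' && y == ']')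

def bLoop (b : List Char) (i j : Int) : Bool :=
  if i < j then
    match PySem.List.pyGet? b i, PySem.List.pyGet? b j with
    | some x, some y => if pvGood x y then bLoop b (i + 1) (j - 1) else false
    | _, _ => false          -- b[i]/b[j] out of range: unreachable in B's loop (guard for totality)
  else decide (i > j)
termination_by (j - i).toNat
decreasing_by omega

def sulut_tasapainossa_alt (merkkijono : String) : Bool :=
  let b := merkkijono.toList.filter (fun c => PySem.Chars.isIn [c] "()[]{}".toList)
  bLoop b 0 (b.length - 1)

-- ===== PRECONDITION & SPEC =====
def Spec_sulut_tasapainossa (merkkijono : String) (out : Bool) : Prop := out = sulut_tasapainossa_alt merkkijono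
instance (merkkijono : String) (out : Bool) : Decidable (Spec_sulut_tasapainossa merkkijono out) := by unfold Spec_sulut_tasapainossa; infer_instance

-- ===== CLAIM (what is proved, stated in full; the proofs are below) =====
def Claim_equal_sulut_tasapainossa : Prop := ∀ (merkkijono : String), Dom_sulut_tasapainossa merkkijono → Spec_sulut_tasapainossa merkkijono (sulut_tasapainossa merkkijono)

-- ===== LEMMAS AND PROOFS =====

-- str.replace with a single-character pattern and empty replacement is a filter
theorem replace_go_filter (c : Char) :
    ∀ (fuel : Nat) (l acc : List Char), l.length ≤ fuel →
      PySem.Chars.replace.go [c] [] fuel l acc = acc.reverse ++ l.filter (· ≠ c) := by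
  intro fuel
  induction fuel with
  | zero =>
    intro l acc h
    have hl : l = [] := by cases l <;> simp_all
    subst hl
    simp [PySem.Chars.replace.go]
  | succ n ih =>
    intro l acc h
    match l with
    | [] => simp [PySem.Chars.replace.go]
    | c' :: t =>
      rw [PySem.Chars.replace.go]
      by_cases hc : c = c'
      · subst hc
        have hpre : [c].isPrefixOf (c :: t) = true := by simp [List.isPrefixOf]
        simp only [hpre, List.length_cons, List.length_nil, List.drop_succ_cons, List.drop_zero,
          List.reverse_nil, List.nil_append, if_true]
        rw [ih t acc (by simpa using h)]
        simp
      · have hbeq : (c == c') = false := by simpa using hc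
        simp only [List.isPrefixOf, hbeq, Bool.false_and, Bool.false_eq_true, if_false]
        rw [ih t (c' :: acc) (by simpa using h)]
        simp [Ne.symm hc]

theorem replace_single_filter (s : String) (c : Char) :
    (PySem.Str.replace s (String.ofList [c]) "").toList = s.toList.filter (· ≠ c) := by
  rw [PySem.Str.toList_replace]
  simp only [String.toList_ofList]
  rw [PySem.Chars.replace]
  simp only [List.isEmpty_cons]
  have := replace_go_filter c s.toList.length s.toList [] (le_refl _)
  simpa using this

-- the filtering loop of A computes exactly a one-pass filter
theorem strip_fold (cs : List Char) : ∀ (t : String),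
    (cs.foldl (fun acc c =>
      if !(PySem.Str.isIn (String.ofList [c]) "()[]{}") then PySem.Str.replace acc (String.ofList [c]) ""
      else acc) t).toList
    = t.toList.filter (fun x => PySem.Chars.isIn [x] "()[]{}".toList || !(cs.contains x)) := by
  induction cs with
  | nil => intro t; simp
  | cons c cs ih =>
    intro t
    rw [List.foldl_cons]
    by_cases hP : PySem.Chars.isIn [c] "()[]{}".toList = true
    · have hs : PySem.Str.isIn (String.ofList [c]) "()[]{}" = true := by
        rw [PySem.Str.isIn_eq]; simpa using hP
      rw [hs]
      simp only [Bool.not_true, Bool.false_eq_true, if_false]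
      rw [ih t]
      apply List.filter_congr
      intro x _
      by_cases hxc : x = c
      · subst hxc
        have hPl : PySem.Chars.isIn [x] ['(', ')', '[', ']', '{', '}'] = true := by simpa using hP
        simp [hPl]
      · simp [hxc]
    · have hP' : PySem.Chars.isIn [c] "()[]{}".toList = false := by simpa using hP
      have hs : PySem.Str.isIn (String.ofList [c]) "()[]{}" = false := by
        rw [PySem.Str.isIn_eq]; simpa using hP'
      rw [hs]
      simp only [Bool.not_false, if_true]
      rw [ih (PySem.Str.replace t (String.ofList [c]) ""), replace_single_filter]
      rw [List.filter_filter]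
      apply List.filter_congr
      intro x _
      by_cases hxc : x = c
      · subst hxc
        have hPl : PySem.Chars.isIn [x] ['(', ')', '[', ']', '{', '}'] = false := by simpa using hP'
        simp [hPl]
      · simp [hxc]

theorem aStrip_toList (s : String) :
    (aStrip s).toList = s.toList.filter (fun c => PySem.Chars.isIn [c] "()[]{}".toList) := by
  rw [aStrip, strip_fold]
  apply List.filter_congr
  intro x hx
  simp [hx]

theorem aRec_nil : aRec [] = true := by rw [aRec]; simp

theorem aRec_singleton (x : Char) : aRec [x] = false := by
  rw [aRec]
  have h1 : (x == '(' && x == ')') = false := by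
    by_cases h : x = '(' <;> simp [h]
  have h2 : (x == '[' && x == ']') = false := by
    by_cases h : x = '[' <;> simp [h]
  simp [PySem.List.pyGet?_neg_one, h1, h2]

theorem bLoop_step {b : List Char} {i j : Int} {x y : Char} (hij : i < j)
    (hx : PySem.List.pyGet? b i = some x) (hy : PySem.List.pyGet? b j = some y) :
    bLoop b i j = if pvGood x y then bLoop b (i + 1) (j - 1) else false := by
  rw [bLoop, if_pos hij, hx, hy]

theorem slice_one_neg_one (l : List Char) (h : 2 ≤ l.length) :
    PySem.List.slice l (some 1) (some (-1)) = (l.drop 1).take (l.length - 2) := by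
  rw [PySem.List.slice]
  have ha : PySem.List.clampIdx l.length 1 = 1 := by
    simp [PySem.List.clampIdx]; omega
  have hb : PySem.List.clampIdx l.length (-1) = l.length - 1 := PySem.List.clampIdx_neg_one _
  rw [ha, hb]
  congr 1

-- the ¬ i < j tail of the loop against A's recursion on the (≤ 1 element) segment
theorem bLoop_base (b : List Char) (i j : Int) (hi : 0 ≤ i) (hjl : j < (b.length : Int))
    (hij : ¬ i < j) :
    (decide (i > j) : Bool) = aRec ((b.drop i.toNat).take (j + 1 - i).toNat) := by
  by_cases hgt : i > j
  · have hz : (j + 1 - i).toNat = 0 := by omega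
    simp [hgt, hz, aRec_nil]
  · have hij' : i = j := by omega
    subst hij'
    have hjn : 0 ≤ i := hi
    have hlt : i.toNat < b.length := by omega
    have hne : b.drop i.toNat ≠ [] := by
      simp [List.drop_eq_nil_iff]; omega
    obtain ⟨x, xs, hx⟩ := List.exists_cons_of_ne_nil hne
    simp [hx, List.take_succ_cons, aRec_singleton]

theorem bLoop_eq_aRec_seg : ∀ (k : Nat) (b : List Char) (i j : Int),
    (j - i).toNat ≤ k → 0 ≤ i → j < (b.length : Int) →
    bLoop b i j = aRec ((b.drop i.toNat).take (j + 1 - i).toNat) := by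
  intro k
  induction k with
  | zero =>
    intro b i j hk hi hjl
    have hij : ¬ i < j := by omega
    rw [bLoop, if_neg hij]
    exact bLoop_base b i j hi hjl hij
  | succ n ih =>
    intro b i j hk hi hjl
    by_cases hij : i < j
    · have hjn : 0 ≤ j := by omega
      have hilen : i < (b.length : Int) := by omega
      have hx := PySem.List.pyGet?_eq_some_getElem b hi hilen
      have hy := PySem.List.pyGet?_eq_some_getElem b hjn hjl
      rw [bLoop_step hij hx hy]
      set seg := (b.drop i.toNat).take (j + 1 - i).toNat with hseg
      have hseglen : seg.length = (j + 1 - i).toNat := by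
        rw [hseg, List.length_take, List.length_drop]
        omega
      have hlen2 : 2 ≤ seg.length := by rw [hseglen]; omega
      have hs0 : PySem.List.pyGet? seg 0 = some b[i.toNat] := by
        rw [PySem.List.pyGet?_zero]
        rw [hseg]
        rw [List.getElem?_take, List.getElem?_drop]
        simp only [Nat.add_zero]
        rw [if_pos (by omega)]
        rw [List.getElem?_eq_getElem (by omega)]
      have hs1 : PySem.List.pyGet? seg (-1) = some b[j.toNat] := by
        rw [PySem.List.pyGet?_neg_one]
        rw [List.getLast?_eq_getElem?]
        rw [hseg, List.getElem?_take, List.getElem?_drop]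
        rw [hseg] at hseglen
        rw [if_pos (by omega)]
        rw [List.getElem?_eq_getElem (by omega)]
        congr 2
        omega
      rw [aRec]
      rw [if_neg (show ¬ seg.length = 0 by omega)]
      rw [hs0, hs1]
      have hcond : (!(some b[i.toNat] == some '(' && some b[j.toNat] == some ')')
          && !(some b[i.toNat] == some '[' && some b[j.toNat] == some ']'))
          = !pvGood b[i.toNat] b[j.toNat] := by
        simp [pvGood, Bool.not_or]
      rw [hcond]
      by_cases hg : pvGood b[i.toNat] b[j.toNat] = true
      · simp only [hg, Bool.not_true, Bool.false_eq_true, if_false, if_true]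
        rw [ih b (i + 1) (j - 1) (by omega) (by omega) (by omega)]
        congr 1
        rw [slice_one_neg_one seg hlen2, hseglen]
        rw [hseg, List.drop_take, List.drop_drop, List.take_take]
        have e1 : (i + 1).toNat = i.toNat + 1 := by omega
        have e2 : (j - 1 + 1 - (i + 1)).toNat
            = min ((j + 1 - i).toNat - 2) ((j + 1 - i).toNat - 1) := by omega
        rw [e1, e2]
      · have hg' : pvGood b[i.toNat] b[j.toNat] = false := by simpa using hg
        simp only [hg', Bool.not_false, Bool.false_eq_true, if_false, if_true]
    · rw [bLoop, if_neg hij]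
      exact bLoop_base b i j hi hjl hij

theorem aRec_eq_bLoop (l : List Char) : aRec l = bLoop l 0 ((l.length : Int) - 1) := by
  rw [bLoop_eq_aRec_seg ((l.length : Int) - 0).toNat l 0 ((l.length : Int) - 1)
    (by omega) (by omega) (by omega)]
  congr 1
  have h : ((l.length : Int) - 1 + 1 - 0).toNat = l.length := by omega
  rw [h]
  simp

-- ===== VERDICT (by name: the statement is the Claim_ definition above) =====
theorem sulut_tasapainossa_spec : Claim_equal_sulut_tasapainossa := by
  intro s _
  unfold Spec_sulut_tasapainossa sulut_tasapainossa sulut_tasapainossa_alt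
  rw [aStrip_toList, aRec_eq_bLoop]
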